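-- pv_equiv track=rewrite | github.com/ShantamShorewala/vehicle-speed-estimation | speed_estimate_class_updated.py | check_orientation
-- ===== SOURCE A (Python) =====
-- def check_orientation(pointers):
--
-- 	back=0
-- 	front=0
--
-- 	for idx in pointers:
-- 		if (idx == 0) or (idx == 1) or (idx == 6):
-- 			back+=1
-- 		elif (idx==17) or (idx==18) or (idx==19) or (idx==20) or (idx==21):
-- 			front+=1
--
-- 	return back, front
-- ===== SOURCE B (Python) =====
-- def check_orientation(pointers):
--     counts = {}
--     for idx in pointers:
--         counts[idx] = counts.get(idx, 0) + 1
--     back = counts.get(0, 0) + counts.get(1, 0) + counts.get(6, 0)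
--     front = counts.get(17, 0) + counts.get(18, 0) + counts.get(19, 0) + counts.get(20, 0) + counts.get(21, 0)
--     return back, front
-- ===== Notes on version B (the rewrite author's own statement) =====
-- stated objective: alternative
-- what changed: B builds a frequency table of the whole list in one dict pass and then reads the eight fixed keys, instead of A's per-element branch chain incrementing two accumulators.
import Mathlib
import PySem

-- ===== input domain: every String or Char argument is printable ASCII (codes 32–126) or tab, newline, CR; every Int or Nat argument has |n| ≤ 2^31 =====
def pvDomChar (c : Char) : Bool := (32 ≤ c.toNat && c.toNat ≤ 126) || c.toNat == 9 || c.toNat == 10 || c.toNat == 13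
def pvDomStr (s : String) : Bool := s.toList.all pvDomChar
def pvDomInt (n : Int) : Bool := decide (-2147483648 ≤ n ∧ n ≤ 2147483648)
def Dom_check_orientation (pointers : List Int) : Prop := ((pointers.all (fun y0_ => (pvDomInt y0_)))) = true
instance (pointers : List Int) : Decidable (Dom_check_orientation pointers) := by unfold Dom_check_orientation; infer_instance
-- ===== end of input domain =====

-- B replaces A's per-element branch chain by one frequency-table pass followed by eight fixed-key lookups (objective: alternative).

-- ===== PORT A =====
-- the loop body of A: the if/elif chain updating (back, front)
def check_orientation_step (s : Int × Int) (idx : Int) : Int × Int :=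
  if idx = 0 ∨ idx = 1 ∨ idx = 6 then (s.1 + 1, s.2)
  else if idx = 17 ∨ idx = 18 ∨ idx = 19 ∨ idx = 20 ∨ idx = 21 then (s.1, s.2 + 1)
  else s

def check_orientation (pointers : List Int) : Int × Int :=
  pointers.foldl check_orientation_step (0, 0)

-- ===== PORT B =====
def check_orientation_alt (pointers : List Int) : Int × Int :=
  let counts : PySem.Dict Int Int :=
    pointers.foldl (fun d x => d.insert x (d.getD x 0 + 1)) PySem.Dict.empty
  let back := counts.getD 0 0 + counts.getD 1 0 + counts.getD 6 0
  let front := counts.getD 17 0 + counts.getD 18 0 + counts.getD 19 0 +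
    counts.getD 20 0 + counts.getD 21 0
  (back, front)

-- ===== PRECONDITION & SPEC =====
def Spec_check_orientation (pointers : List Int) (out : Int × Int) : Prop := out = check_orientation_alt pointers
instance (pointers : List Int) (out : Int × Int) : Decidable (Spec_check_orientation pointers out) := by unfold Spec_check_orientation; infer_instance

-- ===== CLAIM (what is proved, stated in full; the proofs are below) =====
def Claim_equal_check_orientation : Prop := ∀ (pointers : List Int), Dom_check_orientation pointers → Spec_check_orientation pointers (check_orientation pointers)

-- ===== LEMMAS AND PROOFS =====

theorem check_orientation_foldl (xs : List Int) (b f : Int) :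
    xs.foldl check_orientation_step (b, f)
    = (b + xs.count 0 + xs.count 1 + xs.count 6,
       f + xs.count 17 + xs.count 18 + xs.count 19 + xs.count 20 + xs.count 21) := by
  induction xs generalizing b f with
  | nil => simp
  | cons x xs ih =>
    rw [List.foldl_cons]
    by_cases h1 : x = 0 ∨ x = 1 ∨ x = 6
    · rw [show check_orientation_step (b, f) x = (b + 1, f) from by
        simp [check_orientation_step, h1], ih]
      rcases h1 with h | h | h <;> subst h <;> simp <;> ring
    · by_cases h2 : x = 17 ∨ x = 18 ∨ x = 19 ∨ x = 20 ∨ x = 21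
      · rw [show check_orientation_step (b, f) x = (b, f + 1) from by
          simp [check_orientation_step, h1, h2], ih]
        rcases h2 with h | h | h | h | h <;> subst h <;> simp <;> ring
      · rw [show check_orientation_step (b, f) x = (b, f) from by
          simp [check_orientation_step, h1, h2], ih]
        simp only [not_or] at h1 h2
        obtain ⟨a1, a2, a3⟩ := h1
        obtain ⟨c1, c2, c3, c4, c5⟩ := h2
        simp [a1, a2, a3, c1, c2, c3, c4, c5]

-- ===== VERDICT (by name: the statement is the Claim_ definition above) =====
theorem check_orientation_spec : Claim_equal_check_orientation := by
  intro pointers _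
  unfold Spec_check_orientation check_orientation check_orientation_alt
  rw [check_orientation_foldl]
  simp only [PySem.Dict.getD_foldl_insert_add_one, PySem.Dict.getD_empty]
  simp only [Prod.mk.injEq]
  constructor <;> ring
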